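-- pv_equiv track=rewrite | github.com/asymmetric2010/crypt_learning | 01248.py | yunying_decode
-- ===== SOURCE A (Python) =====
-- def yunying_decode(c):
--     t="abcdefghijklmnopqrstuvwxyz"
--     l=c.split("0")
--     r=""
--     for i in l:
--         tep=0
--         for j in i:
--             tep+=int(j)
--         r+=t[tep-1]
--     return r
-- ===== SOURCE B (Python) =====
-- def yunying_decode(c):
--     t = "abcdefghijklmnopqrstuvwxyz"
--     r = []
--     acc = 0
--     for ch in c:
--         if ch == "0":
--             r.append(t[acc - 1])
--             acc = 0
--         else:
--             acc += int(ch)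
--     r.append(t[acc - 1])
--     return "".join(r)
-- ===== Notes on version B (the rewrite author's own statement) =====
-- stated objective: simpler
-- what changed: Replaces split('0') plus a nested summing loop and string concatenation by a single pass over the characters with a running digit-sum accumulator flushed at each '0' and once at the end, collecting letters in a list joined once.
import Mathlib
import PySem

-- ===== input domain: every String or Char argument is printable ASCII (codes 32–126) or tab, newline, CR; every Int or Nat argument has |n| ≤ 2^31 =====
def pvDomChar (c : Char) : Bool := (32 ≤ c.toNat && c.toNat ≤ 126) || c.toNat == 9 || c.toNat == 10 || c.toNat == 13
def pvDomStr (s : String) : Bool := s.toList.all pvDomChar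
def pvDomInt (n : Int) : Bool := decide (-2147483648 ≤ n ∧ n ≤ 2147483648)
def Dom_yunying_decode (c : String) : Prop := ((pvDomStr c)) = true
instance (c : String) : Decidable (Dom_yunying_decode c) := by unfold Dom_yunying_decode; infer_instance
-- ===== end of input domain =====

-- B replaces split("0") + a nested summing loop by one pass with a running accumulator flushed at each '0' (objective: simpler).


-- ===== PORT A =====
def yunying_decode (c : String) : String :=
  let t := "abcdefghijklmnopqrstuvwxyz".toList
  let l := PySem.Chars.splitOn c.toList ['0']
  let r := l.foldl (fun r i =>
    let tep := i.foldl (fun tep j => tep + ((PySem.Int.ofChars? [j]).getD 0)) (0 : Int)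
    r ++ ((PySem.List.pyGet? t (tep - 1)).elim [] (fun ch => [ch]))) []
  String.ofList r

-- ===== PORT B =====
def yunying_decode_alt (c : String) : String :=
  let t := "abcdefghijklmnopqrstuvwxyz".toList
  let st := c.toList.foldl (fun (st : Int × List Char) ch =>
    if ch = '0' then (0, st.2 ++ (PySem.List.pyGet? t (st.1 - 1)).elim [] (fun x => [x]))
    else (st.1 + ((PySem.Int.ofChars? [ch]).getD 0), st.2)) ((0 : Int), ([] : List Char))
  String.ofList (st.2 ++ (PySem.List.pyGet? t (st.1 - 1)).elim [] (fun x => [x]))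

-- ===== PRECONDITION & SPEC =====
-- Pre_: exactly where Python A returns — every char a digit (else int(j) raises ValueError)
-- and every '0'-separated group's digit sum ≤ 26 (else t[tep-1] raises IndexError).
def Pre_yunying_decode (c : String) : Prop :=
  c.toList.all Char.isDigit = true ∧
  ∀ g ∈ PySem.Chars.splitOn c.toList ['0'], (g.map (fun ch => ch.toNat - 48)).sum ≤ 26
instance (c : String) : Decidable (Pre_yunying_decode c) := by unfold Pre_yunying_decode; infer_instance
def pvWitness_yunying_decode : String := "120"

def Spec_yunying_decode (c : String) (out : String) : Prop := out = yunying_decode_alt c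
instance (c : String) (out : String) : Decidable (Spec_yunying_decode c out) := by unfold Spec_yunying_decode; infer_instance

-- ===== CLAIM (what is proved, stated in full; the proofs are below) =====
def Claim_equal_yunying_decode : Prop := ∀ (c : String), Dom_yunying_decode c → Pre_yunying_decode c → Spec_yunying_decode c (yunying_decode c)

-- ===== LEMMAS AND PROOFS =====

-- the letter A/B append for an accumulated digit sum n (t[n-1], empty where Python would raise)
def pvEmit (n : Int) : List Char :=
  (PySem.List.pyGet? "abcdefghijklmnopqrstuvwxyz".toList (n - 1)).elim [] (fun ch => [ch])

def pvD (ch : Char) : Int := (PySem.Int.ofChars? [ch]).getD 0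

def pvDsum (g : List Char) : Int := (g.map pvD).sum

-- structural form of split on the single character '0'
def pvSplit : List Char → List (List Char)
  | [] => [[]]
  | c :: cs =>
    if c = '0' then [] :: pvSplit cs
    else match pvSplit cs with
      | [] => [[c]]
      | g :: gs => (c :: g) :: gs

lemma pvSplit_ne_nil (cs : List Char) : pvSplit cs ≠ [] := by
  cases cs with
  | nil => simp [pvSplit]
  | cons c cs =>
    simp only [pvSplit]
    split
    · simp
    · split <;> simp

def pvConsH (p : List Char) : List (List Char) → List (List Char)
  | [] => [p]
  | g :: gs => (p ++ g) :: gs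

lemma pvGo_spec (fuel : Nat) : ∀ (l cur : List Char) (acc : List (List Char)), l.length ≤ fuel →
    PySem.Chars.splitOn.go ['0'] fuel l cur acc
      = acc.reverse ++ pvConsH cur.reverse (pvSplit l) := by
  induction fuel with
  | zero =>
    intro l cur acc h
    have : l = [] := by cases l <;> simp_all
    subst this
    simp [PySem.Chars.splitOn.go, pvSplit, pvConsH]
  | succ n ih =>
    intro l cur acc h
    cases l with
    | nil => simp [PySem.Chars.splitOn.go, pvSplit, pvConsH]
    | cons c rest =>
      by_cases hc : c = '0'
      · subst hc
        have hpre : List.isPrefixOf ['0'] ('0' :: rest) = true := by simp [List.isPrefixOf]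
        rw [show PySem.Chars.splitOn.go ['0'] (n+1) ('0' :: rest) cur acc
              = PySem.Chars.splitOn.go ['0'] n (List.drop 1 ('0' :: rest)) [] (cur.reverse :: acc) by
            simp [PySem.Chars.splitOn.go, hpre]]
        rw [ih _ [] _ (by simpa using Nat.le_of_succ_le_succ h)]
        simp only [List.drop_succ_cons, List.drop_zero, List.reverse_cons, List.reverse_nil]
        cases hs : pvSplit rest with
        | nil => exact absurd hs (pvSplit_ne_nil rest)
        | cons g gs => simp [pvSplit, pvConsH, hs]
      · have hpre : List.isPrefixOf ['0'] (c :: rest) = false := by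
          simp [List.isPrefixOf, Ne.symm hc]
        rw [show PySem.Chars.splitOn.go ['0'] (n+1) (c :: rest) cur acc
              = PySem.Chars.splitOn.go ['0'] n rest (c :: cur) acc by
            simp [PySem.Chars.splitOn.go, hpre]]
        rw [ih _ (c :: cur) _ (by simpa using Nat.le_of_succ_le_succ h)]
        cases hs : pvSplit rest with
        | nil => exact absurd hs (pvSplit_ne_nil rest)
        | cons g gs => simp [pvSplit, hc, pvConsH, hs]

lemma pvSplitOn_eq (cs : List Char) : PySem.Chars.splitOn cs ['0'] = pvSplit cs := by
  rw [show PySem.Chars.splitOn cs ['0'] = PySem.Chars.splitOn.go ['0'] (cs.length + 1) cs [] [] from rfl]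
  rw [pvGo_spec (cs.length + 1) cs [] [] (Nat.le_succ _)]
  cases hs : pvSplit cs with
  | nil => exact absurd hs (pvSplit_ne_nil cs)
  | cons g gs => simp [pvConsH]

lemma pvFoldl_d (g : List Char) : ∀ (a : Int),
    g.foldl (fun tep j => tep + ((PySem.Int.ofChars? [j]).getD 0)) a = a + pvDsum g := by
  induction g with
  | nil => intro a; simp [pvDsum]
  | cons c cs ih => intro a; simp [List.foldl, ih, pvDsum, pvD]; ring

-- letters B's pass emits on cs, starting from accumulator acc (including the final flush)
def pvBlets : List Char → Int → List Char
  | [], acc => pvEmit acc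
  | c :: cs, acc => if c = '0' then pvEmit acc ++ pvBlets cs 0 else pvBlets cs (acc + pvD c)

lemma pvBlets_eq_split (cs : List Char) : ∀ (acc : Int),
    pvBlets cs acc =
      match pvSplit cs with
      | [] => []
      | g :: gs => pvEmit (acc + pvDsum g) ++ gs.flatMap (fun g => pvEmit (pvDsum g)) := by
  induction cs with
  | nil => intro acc; simp [pvBlets, pvSplit, pvDsum, pvEmit]
  | cons c cs ih =>
    intro acc
    by_cases hc : c = '0'
    · subst hc
      simp only [pvBlets, pvSplit, ih 0]
      cases hs : pvSplit cs with
      | nil => exact absurd hs (pvSplit_ne_nil cs)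
      | cons g gs => simp [pvDsum, List.flatMap_cons]
    · simp only [pvBlets, pvSplit, if_neg hc, ih (acc + pvD c)]
      cases hs : pvSplit cs with
      | nil => exact absurd hs (pvSplit_ne_nil cs)
      | cons g gs =>
        simp [pvDsum, add_assoc]

lemma pvB_loop (cs : List Char) : ∀ (acc : Int) (r : List Char),
    (let st := cs.foldl (fun (st : Int × List Char) ch =>
        if ch = '0' then (0, st.2 ++ pvEmit st.1) else (st.1 + pvD ch, st.2)) (acc, r)
     st.2 ++ pvEmit st.1) = r ++ pvBlets cs acc := by
  induction cs with
  | nil => intro acc r; simp [pvBlets]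
  | cons c cs ih =>
    intro acc r
    by_cases hc : c = '0'
    · subst hc
      simp [List.foldl, pvBlets, ih 0 (r ++ pvEmit acc)]
    · simp [List.foldl, hc, pvBlets, ih (acc + pvD c) r]

lemma pvA_foldl (l : List (List Char)) : ∀ (r : List Char),
    l.foldl (fun r g => r ++ pvEmit (pvDsum g)) r = r ++ l.flatMap (fun g => pvEmit (pvDsum g)) := by
  induction l with
  | nil => intro r; simp
  | cons g gs ih => intro r; simp [List.foldl, ih]

lemma pv_main (cs : List Char) :
    (PySem.Chars.splitOn cs ['0']).foldl (fun r i =>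
        r ++ pvEmit (i.foldl (fun tep j => tep + ((PySem.Int.ofChars? [j]).getD 0)) 0)) []
      = pvBlets cs 0 := by
  have he : ∀ (i : List Char),
      pvEmit (i.foldl (fun tep j => tep + ((PySem.Int.ofChars? [j]).getD 0)) 0) = pvEmit (pvDsum i) := by
    intro i; rw [pvFoldl_d i 0]; simp
  rw [pvSplitOn_eq]
  calc (pvSplit cs).foldl (fun r i =>
          r ++ pvEmit (i.foldl (fun tep j => tep + ((PySem.Int.ofChars? [j]).getD 0)) 0)) []
      = (pvSplit cs).foldl (fun r g => r ++ pvEmit (pvDsum g)) [] := by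
        apply PySem.List.foldl_congr_mem
        intro r g _; rw [he]
    _ = (pvSplit cs).flatMap (fun g => pvEmit (pvDsum g)) := by rw [pvA_foldl]; simp
    _ = pvBlets cs 0 := by
        rw [pvBlets_eq_split cs 0]
        cases hs : pvSplit cs with
        | nil => exact absurd hs (pvSplit_ne_nil cs)
        | cons g gs => simp

-- ===== VERDICT (by name: the statement is the Claim_ definition above) =====
theorem yunying_decode_spec : Claim_equal_yunying_decode := by
  intro c _ _
  show yunying_decode c = yunying_decode_alt c
  unfold yunying_decode yunying_decode_alt
  have hB := pvB_loop c.toList 0 []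
  simp only [pvEmit, pvD] at hB ⊢
  rw [hB]
  have hA := pv_main c.toList
  simp only [pvEmit] at hA
  rw [hA]
  rfl
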